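-- pv_equiv track=rewrite | github.com/shiyang07ca/lab | algo/oj/leetcode/contest/weekly-357/3.find-the-safest-path-in-a-grid/solution.py | maximumSafenessFactor2
-- ===== SOURCE A (Python) =====
-- from typing import List
--
-- def maximumSafenessFactor2(grid: List[List[int]]) -> int:
--     n = len(grid)
--     q = []
--     dis = [[-1] * n for _ in range(n)]
--     for i, row in enumerate(grid):
--         for j, x in enumerate(row):
--             if x:
--                 q.append((i, j))
--                 dis[i][j] = 0
--
--     groups = [q]
--     while q:  # 多源 BFS
--         tmp = q
--         q = []
--         for i, j in tmp:
--             for x, y in (i + 1, j), (i - 1, j), (i, j + 1), (i, j - 1):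
--                 if 0 <= x < n and 0 <= y < n and dis[x][y] < 0:
--                     q.append((x, y))
--                     dis[x][y] = len(groups)
--         groups.append(q)  # 相同 dis 分组记录
--
--     # 并查集模板
--     fa = list(range(n * n))
--
--     def find(x: int) -> int:
--         if fa[x] != x:
--             fa[x] = find(fa[x])
--         return fa[x]
--
--     for d in range(len(groups) - 2, 0, -1):
--         for i, j in groups[d]:
--             for x, y in (i + 1, j), (i - 1, j), (i, j + 1), (i, j - 1):
--                 if 0 <= x < n and 0 <= y < n and dis[x][y] >= dis[i][j]:
--                     fa[find(x * n + y)] = find(i * n + j)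
--         if find(0) == find(n * n - 1):  # 写这里判断更快些
--             return d
--     return 0
-- ===== SOURCE B (Python) =====
-- from typing import List
--
-- def maximumSafenessFactor2(grid: List[List[int]]) -> int:
--     n = len(grid)
--     q = []
--     dis = [[-1] * n for _ in range(n)]
--     for i, row in enumerate(grid):
--         for j, x in enumerate(row):
--             if x:
--                 q.append((i, j))
--                 dis[i][j] = 0
--
--     groups = [q]
--     while q:  # same multi-source BFS as A: dis[][] and the distance groups
--         tmp = q
--         q = []
--         for i, j in tmp:
--             for x, y in (i + 1, j), (i - 1, j), (i, j + 1), (i, j - 1):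
--                 if 0 <= x < n and 0 <= y < n and dis[x][y] < 0:
--                     q.append((x, y))
--                     dis[x][y] = len(groups)
--         groups.append(q)
--
--     # weighted quick-find: flat component labels + member lists, eager relabelling
--     comp = list(range(n * n))
--     members = [[k] for k in range(n * n)]
--     for d in range(len(groups) - 2, 0, -1):
--         for i, j in groups[d]:
--             for x, y in (i + 1, j), (i - 1, j), (i, j + 1), (i, j - 1):
--                 if 0 <= x < n and 0 <= y < n and dis[x][y] >= dis[i][j]:
--                     la, lb = comp[x * n + y], comp[i * n + j]
--                     if la != lb:
--                         if len(members[la]) > len(members[lb]):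
--                             la, lb = lb, la
--                         for c in members[la]:
--                             comp[c] = lb
--                         members[lb] += members[la]
--                         members[la] = []
--         if comp[0] == comp[n * n - 1]:
--             return d
--     return 0
-- ===== Notes on version B (the rewrite author's own statement) =====
-- stated objective: alternative
-- what changed: Phase 1 (multi-source BFS distance field and groups) is kept; the second phase's recursive path-compressing union-find is replaced by an eagerly-relabelled weighted quick-find (a flat component-label array plus per-label member lists, merging the smaller class into the larger), so connectivity queries become single array reads and there is no recursion.
import Mathlib
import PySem

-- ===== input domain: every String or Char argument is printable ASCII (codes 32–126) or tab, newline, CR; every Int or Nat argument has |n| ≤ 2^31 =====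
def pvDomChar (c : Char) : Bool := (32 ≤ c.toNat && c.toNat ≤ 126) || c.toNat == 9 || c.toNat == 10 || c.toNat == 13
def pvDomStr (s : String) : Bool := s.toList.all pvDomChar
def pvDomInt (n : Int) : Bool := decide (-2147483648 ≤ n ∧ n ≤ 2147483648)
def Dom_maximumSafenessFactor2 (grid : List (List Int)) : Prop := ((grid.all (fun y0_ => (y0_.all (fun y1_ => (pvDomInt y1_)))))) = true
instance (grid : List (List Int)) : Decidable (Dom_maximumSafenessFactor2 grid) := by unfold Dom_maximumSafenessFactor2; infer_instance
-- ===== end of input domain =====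

-- B keeps A's multi-source-BFS phase but replaces the recursive path-compressing
-- union-find of the second phase by an eagerly-relabelled weighted quick-find
-- (flat label array + per-label member lists); alternative algorithm, same values.

-- ===== PORT A =====
-- shared phase 1 (the BFS code is textually identical in Source A and Source B, so it is
-- ported once and used by both ports)

-- dis is the n×n distance matrix; reads/writes are exact for the 0 ≤ x,y < n
-- indices the Python code guards with its own bounds checks (out-of-range writes,
-- where Python raises IndexError, are excluded by Pre_ and no-op here).
def pvDisGet (dis : Array (Array Int)) (x y : Int) : Int :=
  (dis.getD x.toNat #[]).getD y.toNat (-1)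

def pvDisSet (dis : Array (Array Int)) (x y : Int) (v : Int) : Array (Array Int) :=
  dis.setIfInBounds x.toNat ((dis.getD x.toNat #[]).setIfInBounds y.toNat v)

-- the tuple (i+1,j),(i-1,j),(i,j+1),(i,j-1)
def pvNbrs (c : Int × Int) : List (Int × Int) :=
  [(c.1 + 1, c.2), (c.1 - 1, c.2), (c.1, c.2 + 1), (c.1, c.2 - 1)]

-- the two initial 'for i, row in enumerate(grid): for j, x in enumerate(row)' loops
def pvSources (grid : List (List Int)) : List (Int × Int) × Array (Array Int) :=
  (PySem.List.enumerate grid 0).foldl (fun acc p =>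
    (PySem.List.enumerate p.2 0).foldl (fun acc q =>
      if q.2 ≠ 0 then (acc.1 ++ [(p.1, q.1)], pvDisSet acc.2 p.1 q.1 0) else acc) acc)
    ([], Array.replicate grid.length (Array.replicate grid.length (-1)))

-- one iteration of the 'while q' body (tmp = q; q = []; …)
def pvBfsInner (n : Nat) (L : Nat) (acc : List (Int × Int) × Array (Array Int))
    (c : Int × Int) : List (Int × Int) × Array (Array Int) :=
  (pvNbrs c).foldl (fun acc xy =>
    if 0 ≤ xy.1 ∧ xy.1 < (n : Int) ∧ 0 ≤ xy.2 ∧ xy.2 < (n : Int) ∧ pvDisGet acc.2 xy.1 xy.2 < 0 then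
      (acc.1 ++ [xy], pvDisSet acc.2 xy.1 xy.2 (L : Int))
    else acc) acc

def pvBfsStep (n : Nat) (L : Nat) (tmp : List (Int × Int)) (dis : Array (Array Int)) :
    List (Int × Int) × Array (Array Int) :=
  tmp.foldl (pvBfsInner n L) ([], dis)

-- 'while q': fuel n*n+2 is enough, since every iteration but the last marks at
-- least one of the n*n cells (the last runs with q = [])
def pvBfs (n : Nat) : Nat → List (Int × Int) → List (List (Int × Int)) → Array (Array Int) →
    List (List (Int × Int)) × Array (Array Int)
  | 0, _, groups, dis => (groups, dis)
  | fuel + 1, q, groups, dis =>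
    if q = [] then (groups, dis)
    else
      let r := pvBfsStep n groups.length q dis
      pvBfs n fuel r.1 (groups ++ [r.1]) r.2

def pvPhase1 (grid : List (List Int)) : List (List (Int × Int)) × Array (Array Int) :=
  let sd := pvSources grid
  pvBfs grid.length (grid.length * grid.length + 2) sd.1 [sd.1] sd.2

-- flattened cell index x*n+y (always applied to 0 ≤ x,y < n)
def pvIdx (n : Nat) (c : Int × Int) : Nat := (c.1 * (n : Int) + c.2).toNat

-- A's recursive 'find' with path compression; fuel n*n always suffices because
-- fa stays an acyclic parent forest on n*n nodes (proved below)
def pvFind : Nat → Array Nat → Nat → Array Nat × Nat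
  | 0, fa, x => (fa, x)
  | fuel + 1, fa, x =>
    let p := fa.getD x x
    if p = x then (fa, x)
    else
      let r := pvFind fuel fa p
      (r.1.setIfInBounds x r.2, r.2)

-- 'fa[find(a)] = find(b)' (Python evaluates the right-hand side first)
def pvUnionA (N : Nat) (a b : Nat) (fa : Array Nat) : Array Nat :=
  let rb := pvFind N fa b
  let ra := pvFind N rb.1 a
  ra.1.setIfInBounds ra.2 rb.2

def pvProcessA (n : Nat) (N : Nat) (dis : Array (Array Int)) (cells : List (Int × Int))
    (fa : Array Nat) : Array Nat :=
  cells.foldl (fun fa c =>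
    (pvNbrs c).foldl (fun fa xy =>
      if 0 ≤ xy.1 ∧ xy.1 < (n : Int) ∧ 0 ≤ xy.2 ∧ xy.2 < (n : Int) ∧
          pvDisGet dis xy.1 xy.2 ≥ pvDisGet dis c.1 c.2 then
        pvUnionA N (pvIdx n xy) (pvIdx n c) fa
      else fa) fa) fa

def pvLoopA (n : Nat) (N : Nat) (groups : List (List (Int × Int))) (dis : Array (Array Int)) :
    List Int → Array Nat → Int
  | [], _ => 0
  | d :: ds, fa =>
    let fa1 := pvProcessA n N dis (groups.getD d.toNat []) fa
    let f0 := pvFind N fa1 0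
    let f1 := pvFind N f0.1 (N - 1)
    if f0.2 = f1.2 then d else pvLoopA n N groups dis ds f1.1

def maximumSafenessFactor2 (grid : List (List Int)) : Int :=
  let n := grid.length
  let p := pvPhase1 grid
  pvLoopA n (n * n) p.1 p.2 (PySem.List.pyRange ((p.1.length : Int) - 2) 0 (-1))
    (Array.range (n * n))

-- ===== PORT B =====
-- weighted quick-find merge: comp is the flat label array, mem the member lists;
-- pvDoMerge s t relabels class s to t and concatenates the member lists
def pvDoMerge (s t : Nat) (st : Array Nat × Array (List Nat)) :
    Array Nat × Array (List Nat) :=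
  ((st.2.getD s []).foldl (fun c x => c.setIfInBounds x t) st.1,
   (st.2.setIfInBounds t (st.2.getD t [] ++ st.2.getD s [])).setIfInBounds s [])

def pvMergeB (_N : Nat) (a b : Nat) (st : Array Nat × Array (List Nat)) :
    Array Nat × Array (List Nat) :=
  let la := st.1.getD a a
  let lb := st.1.getD b b
  if la = lb then st
  else if (st.2.getD la []).length > (st.2.getD lb []).length then pvDoMerge lb la st
  else pvDoMerge la lb st

def pvProcessB (n : Nat) (N : Nat) (dis : Array (Array Int)) (cells : List (Int × Int))
    (st : Array Nat × Array (List Nat)) : Array Nat × Array (List Nat) :=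
  cells.foldl (fun st c =>
    (pvNbrs c).foldl (fun st xy =>
      if 0 ≤ xy.1 ∧ xy.1 < (n : Int) ∧ 0 ≤ xy.2 ∧ xy.2 < (n : Int) ∧
          pvDisGet dis xy.1 xy.2 ≥ pvDisGet dis c.1 c.2 then
        pvMergeB N (pvIdx n xy) (pvIdx n c) st
      else st) st) st

def pvLoopB (n : Nat) (N : Nat) (groups : List (List (Int × Int))) (dis : Array (Array Int)) :
    List Int → Array Nat × Array (List Nat) → Int
  | [], _ => 0
  | d :: ds, st =>
    let st1 := pvProcessB n N dis (groups.getD d.toNat []) st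
    if st1.1.getD 0 0 = st1.1.getD (N - 1) (N - 1) then d else pvLoopB n N groups dis ds st1

def maximumSafenessFactor2_alt (grid : List (List Int)) : Int :=
  let n := grid.length
  let p := pvPhase1 grid
  pvLoopB n (n * n) p.1 p.2 (PySem.List.pyRange ((p.1.length : Int) - 2) 0 (-1))
    (Array.range (n * n), Array.ofFn (n := n * n) (fun k => [k.val]))

-- ===== PRECONDITION & SPEC =====
-- A raises IndexError (writing dis[i][j], an n×n matrix) iff some row of the grid
-- has a nonzero entry in a column ≥ len(grid); Pre_ excludes exactly those grids
-- (B, sharing the phase-1 code, raises there too).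
def Pre_maximumSafenessFactor2 (grid : List (List Int)) : Prop :=
  ∀ row ∈ grid, ∀ z ∈ row.drop grid.length, z = 0
instance (grid : List (List Int)) : Decidable (Pre_maximumSafenessFactor2 grid) := by
  unfold Pre_maximumSafenessFactor2; infer_instance
def pvWitness_maximumSafenessFactor2 : List (List Int) := [[1, 0], [0, 0]]

def Spec_maximumSafenessFactor2 (grid : List (List Int)) (out : Int) : Prop :=
  out = maximumSafenessFactor2_alt grid
instance (grid : List (List Int)) (out : Int) : Decidable (Spec_maximumSafenessFactor2 grid out) := by
  unfold Spec_maximumSafenessFactor2; infer_instance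

-- ===== CLAIM (what is proved, stated in full; the proofs are below) =====
def Claim_equal_maximumSafenessFactor2 : Prop := ∀ (grid : List (List Int)), Dom_maximumSafenessFactor2 grid → Pre_maximumSafenessFactor2 grid → Spec_maximumSafenessFactor2 grid (maximumSafenessFactor2 grid)

-- ===== LEMMAS AND PROOFS =====

-- array getD/setIfInBounds bookkeeping
theorem pvGetD_set_self {α : Type} (a : Array α) (i : Nat) (v d : α) (hi : i < a.size) :
    (a.setIfInBounds i v).getD i d = v := by
  rw [Array.getD_eq_getD_getElem?, Array.getElem?_setIfInBounds, if_pos rfl, if_pos hi]; rfl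

theorem pvGetD_set_ne {α : Type} (a : Array α) (i j : Nat) (v d : α) (hne : j ≠ i) :
    (a.setIfInBounds i v).getD j d = a.getD j d := by
  rw [Array.getD_eq_getD_getElem?, Array.getElem?_setIfInBounds, if_neg (fun h => hne h.symm),
    ← Array.getD_eq_getD_getElem?]

theorem pvGetD_range (n i d : Nat) (h : i < n) : (Array.range n).getD i d = i := by
  rw [Array.getD_eq_getD_getElem?, Array.getElem?_range]
  simp [h]

-- the step function of the parent forest, and the root computed with given fuel
def pvStep (fa : Array Nat) (x : Nat) : Nat := fa.getD x x

def pvRootF : Nat → Array Nat → Nat → Nat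
  | 0, _, x => x
  | f + 1, fa, x => if fa.getD x x = x then x else pvRootF f fa (fa.getD x x)

def pvRt (N : Nat) (fa : Array Nat) (x : Nat) : Nat := pvRootF N fa x

def pvBnd (N : Nat) (fa : Array Nat) : Prop :=
  fa.size = N ∧ ∀ x, x < N → fa.getD x x < N

def pvMeas (N : Nat) (fa : Array Nat) (m : Nat → Nat) : Prop :=
  ∀ x, x < N → fa.getD x x ≠ x → m (fa.getD x x) < m x

theorem pvRootF_fix {fa : Array Nat} {x : Nat} (h : fa.getD x x = x) (f : Nat) :
    pvRootF f fa x = x := by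
  cases f <;> simp [pvRootF, h]

theorem pvRootF_nfix {fa : Array Nat} {x : Nat} (h : ¬ fa.getD x x = x) (f : Nat) :
    pvRootF (f + 1) fa x = pvRootF f fa (fa.getD x x) := by
  simp only [pvRootF]; rw [if_neg h]

theorem pvRootF_congr {fa fb : Array Nat} (h : ∀ z, fa.getD z z = fb.getD z z) :
    ∀ f x, pvRootF f fa x = pvRootF f fb x := by
  intro f
  induction f with
  | zero => intro x; rfl
  | succ f ih =>
    intro x
    simp only [pvRootF, h x]
    split_ifs with hfix
    · rfl
    · exact ih _

theorem pvIter_lt {N : Nat} {fa : Array Nat} (hb : pvBnd N fa) {x : Nat} (hx : x < N) :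
    ∀ k, (pvStep fa)^[k] x < N := by
  intro k
  induction k with
  | zero => simpa
  | succ k ih =>
    rw [Function.iterate_succ_apply']
    exact hb.2 _ ih

theorem pvExists_fix {N : Nat} {fa : Array Nat} {m : Nat → Nat}
    (hb : pvBnd N fa) (hm : pvMeas N fa m) {x : Nat} (hx : x < N) :
    ∃ k, k < N ∧ pvStep fa ((pvStep fa)^[k] x) = (pvStep fa)^[k] x := by
  by_contra hcon
  push Not at hcon
  have hanti : ∀ j i, i < j → j ≤ N → m ((pvStep fa)^[j] x) < m ((pvStep fa)^[i] x) := by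
    intro j
    induction j with
    | zero => intro i hi; omega
    | succ j ih =>
      intro i hi hj
      have hstep : m ((pvStep fa)^[j + 1] x) < m ((pvStep fa)^[j] x) := by
        rw [Function.iterate_succ_apply']
        exact hm _ (pvIter_lt hb hx j) (hcon j (by omega))
      rcases Nat.lt_or_ge i j with h' | h'
      · exact lt_trans hstep (ih i h' (by omega))
      · have hij : i = j := by omega
        subst hij; exact hstep
  have hinj : Function.Injective
      (fun k : Fin (N + 1) => (⟨(pvStep fa)^[k.1] x, pvIter_lt hb hx k.1⟩ : Fin N)) := by
    intro k l hkl
    simp only [Fin.mk.injEq] at hkl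
    by_contra hne
    have hne' : k.1 ≠ l.1 := fun h => hne (Fin.ext h)
    rcases Nat.lt_or_ge k.1 l.1 with h' | h'
    · have := hanti l.1 k.1 h' (by omega)
      rw [hkl] at this; omega
    · have hlt : l.1 < k.1 := by omega
      have := hanti k.1 l.1 hlt (by omega)
      rw [hkl] at this; omega
  have hcard := Fintype.card_le_of_injective _ hinj
  simp [Fintype.card_fin] at hcard

theorem pvRootF_of_fix {fa : Array Nat} :
    ∀ k x f, k ≤ f → pvStep fa ((pvStep fa)^[k] x) = (pvStep fa)^[k] x →
      (pvStep fa (pvRootF f fa x) = pvRootF f fa x ∧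
       ∀ g, f ≤ g → pvRootF g fa x = pvRootF f fa x) := by
  intro k
  induction k with
  | zero =>
    intro x f _ hfix
    simp only [Function.iterate_zero_apply] at hfix
    exact ⟨by rw [pvRootF_fix hfix]; exact hfix,
      fun g _ => by rw [pvRootF_fix hfix, pvRootF_fix hfix]⟩
  | succ k ih =>
    intro x f hkf hfix
    by_cases hx : fa.getD x x = x
    · exact ⟨by rw [pvRootF_fix hx]; exact hx,
        fun g _ => by rw [pvRootF_fix hx, pvRootF_fix hx]⟩
    · obtain ⟨f', rfl⟩ : ∃ f', f = f' + 1 := ⟨f - 1, by omega⟩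
      have hfix' : pvStep fa ((pvStep fa)^[k] (pvStep fa x)) = (pvStep fa)^[k] (pvStep fa x) := by
        rw [← Function.iterate_succ_apply]
        exact hfix
      have ihh := ih (pvStep fa x) f' (by omega) hfix'
      rw [pvRootF_nfix hx]
      exact ⟨ihh.1, fun g hg => by
        obtain ⟨g', rfl⟩ : ∃ g', g = g' + 1 := ⟨g - 1, by omega⟩
        rw [pvRootF_nfix hx]
        exact ihh.2 g' (by omega)⟩

theorem pvRootF_eq_iter_first {fa : Array Nat} :
    ∀ k x f, k ≤ f → pvStep fa ((pvStep fa)^[k] x) = (pvStep fa)^[k] x →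
      (∀ i, i < k → ¬ pvStep fa ((pvStep fa)^[i] x) = (pvStep fa)^[i] x) →
      pvRootF f fa x = (pvStep fa)^[k] x := by
  intro k
  induction k with
  | zero =>
    intro x f _ hfix _
    simp only [Function.iterate_zero_apply] at hfix ⊢
    exact pvRootF_fix hfix f
  | succ k ih =>
    intro x f hkf hfix hmin
    have hx : ¬ fa.getD x x = x := by
      have h0 := hmin 0 (by omega)
      simpa [pvStep] using h0
    obtain ⟨f', rfl⟩ : ∃ f', f = f' + 1 := ⟨f - 1, by omega⟩
    rw [pvRootF_nfix hx, Function.iterate_succ_apply]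
    exact ih (pvStep fa x) f' (by omega)
      (by rw [← Function.iterate_succ_apply]; exact hfix)
      (fun i hi => by rw [← Function.iterate_succ_apply]; exact hmin (i + 1) (by omega))

theorem pvRt_lt {N : Nat} {fa : Array Nat} (hb : pvBnd N fa) {x : Nat} (hx : x < N) :
    pvRt N fa x < N := by
  have aux : ∀ f x, x < N → pvRootF f fa x < N := by
    intro f
    induction f with
    | zero => intro x hx; exact hx
    | succ f ih =>
      intro x hx
      simp only [pvRootF]
      split_ifs with h
      · exact hx
      · exact ih _ (hb.2 x hx)
  exact aux N x hx

theorem pvRt_fixed {N : Nat} {fa : Array Nat} {m : Nat → Nat}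
    (hb : pvBnd N fa) (hm : pvMeas N fa m) {x : Nat} (hx : x < N) :
    fa.getD (pvRt N fa x) (pvRt N fa x) = pvRt N fa x := by
  obtain ⟨k, hk, hfix⟩ := pvExists_fix hb hm hx
  exact (pvRootF_of_fix k x N (by omega) hfix).1

theorem pvRt_parent {N : Nat} {fa : Array Nat} {m : Nat → Nat}
    (hb : pvBnd N fa) (hm : pvMeas N fa m) {x : Nat} (hx : x < N)
    (h : ¬ fa.getD x x = x) :
    pvRt N fa (fa.getD x x) = pvRt N fa x := by
  obtain ⟨N', rfl⟩ : ∃ N', N = N' + 1 := ⟨N - 1, by omega⟩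
  show pvRootF (N' + 1) fa (fa.getD x x) = pvRootF (N' + 1) fa x
  rw [pvRootF_nfix h]
  obtain ⟨k, hk, hfix⟩ := pvExists_fix hb hm (hb.2 x hx)
  exact (pvRootF_of_fix k (fa.getD x x) N' (by omega) hfix).2 (N' + 1) (by omega)

theorem pvM_chain {N : Nat} {fa : Array Nat} {m : Nat → Nat}
    (hb : pvBnd N fa) (hm : pvMeas N fa m) :
    ∀ k x, x < N → (∀ i, i < k → ¬ pvStep fa ((pvStep fa)^[i] x) = (pvStep fa)^[i] x) →
      1 ≤ k → m ((pvStep fa)^[k] x) < m x := by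
  intro k
  induction k with
  | zero => intro x _ _ h1; omega
  | succ k ih =>
    intro x hx hmin h1
    rcases Nat.eq_zero_or_pos k with rfl | hk
    · have h0 := hmin 0 (by omega)
      simp only [Function.iterate_zero_apply] at h0
      have hlt := hm x hx h0
      simpa [pvStep] using hlt
    · have hkk := ih x hx (fun i hi => hmin i (by omega)) hk
      have hnf := hmin k (by omega)
      have hstep : m ((pvStep fa)^[k + 1] x) < m ((pvStep fa)^[k] x) := by
        rw [Function.iterate_succ_apply']
        exact hm _ (pvIter_lt hb hx k) hnf
      omega

theorem pvM_rt_lt {N : Nat} {fa : Array Nat} {m : Nat → Nat}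
    (hb : pvBnd N fa) (hm : pvMeas N fa m) {x : Nat} (hx : x < N)
    (h : ¬ fa.getD x x = x) : m (pvRt N fa x) < m x := by
  obtain ⟨k, hkN, hfix⟩ := pvExists_fix hb hm hx
  have hex : ∃ k, pvStep fa ((pvStep fa)^[k] x) = (pvStep fa)^[k] x := ⟨k, hfix⟩
  have hk0 := Nat.find_spec hex
  have hmin : ∀ i, i < Nat.find hex → ¬ pvStep fa ((pvStep fa)^[i] x) = (pvStep fa)^[i] x :=
    fun i hi => Nat.find_min hex hi
  have hk0le : Nat.find hex ≤ k := Nat.find_min' hex hfix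
  have heq : pvRt N fa x = (pvStep fa)^[Nat.find hex] x :=
    pvRootF_eq_iter_first (Nat.find hex) x N (by omega) hk0 hmin
  have h1 : 1 ≤ Nat.find hex := by
    rcases Nat.eq_zero_or_pos (Nat.find hex) with h0 | hpos
    · exfalso
      rw [h0] at hk0
      simp only [Function.iterate_zero_apply] at hk0
      exact h hk0
    · exact hpos
  rw [heq]
  exact pvM_chain hb hm (Nat.find hex) x hx hmin h1

theorem pvFixed_of_rt_self {N : Nat} {fa : Array Nat} {m : Nat → Nat}
    (hb : pvBnd N fa) (hm : pvMeas N fa m) {r : Nat} (hr : r < N)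
    (h : pvRt N fa r = r) : fa.getD r r = r := by
  by_contra hne
  have h2 := pvM_rt_lt hb hm hr hne
  rw [h] at h2
  omega

theorem pvRt_idem {N : Nat} {fa : Array Nat} {m : Nat → Nat}
    (hb : pvBnd N fa) (hm : pvMeas N fa m) {x : Nat} (hx : x < N) :
    pvRt N fa (pvRt N fa x) = pvRt N fa x :=
  pvRootF_fix (pvRt_fixed hb hm hx) N

-- path compression: writing the root of x at x preserves everything
theorem pvCompress {N : Nat} {fa : Array Nat} {m : Nat → Nat}
    (hb : pvBnd N fa) (hm : pvMeas N fa m) {x : Nat} (hx : x < N) :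
    pvBnd N (fa.setIfInBounds x (pvRt N fa x)) ∧
    pvMeas N (fa.setIfInBounds x (pvRt N fa x)) m ∧
    ∀ y, y < N → pvRt N (fa.setIfInBounds x (pvRt N fa x)) y = pvRt N fa y := by
  by_cases hfx : fa.getD x x = x
  · have hr : pvRt N fa x = x := pvRootF_fix hfx N
    have hpt : ∀ z, (fa.setIfInBounds x (pvRt N fa x)).getD z z = fa.getD z z := by
      intro z
      by_cases hz : z = x
      · subst hz
        rw [pvGetD_set_self _ _ _ _ (by rw [hb.1]; exact hx), hr]
        exact hfx.symm
      · exact pvGetD_set_ne _ _ _ _ _ hz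
    refine ⟨⟨by simp [hb.1], fun z hz => by rw [hpt]; exact hb.2 z hz⟩,
      fun z hz hne => by rw [hpt] at hne ⊢; exact hm z hz hne,
      fun y _ => pvRootF_congr hpt N y⟩
  · have hfix := pvRt_fixed hb hm hx
    have hrne : pvRt N fa x ≠ x := by
      intro hcon
      rw [hcon] at hfix
      exact hfx hfix
    have hrlt : pvRt N fa x < N := pvRt_lt hb hx
    have hsz : x < fa.size := by rw [hb.1]; exact hx
    have hpt : ∀ z, (fa.setIfInBounds x (pvRt N fa x)).getD z z =
        if z = x then pvRt N fa x else fa.getD z z := by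
      intro z
      by_cases hz : z = x
      · subst hz; rw [if_pos rfl]; exact pvGetD_set_self _ _ _ _ hsz
      · rw [if_neg hz]; exact pvGetD_set_ne _ _ _ _ _ hz
    have hbnd' : pvBnd N (fa.setIfInBounds x (pvRt N fa x)) := by
      refine ⟨by simp [hb.1], fun z hz => ?_⟩
      rw [hpt]
      split_ifs
      · exact hrlt
      · exact hb.2 z hz
    have hmr : m (pvRt N fa x) < m x := pvM_rt_lt hb hm hx hfx
    have hmeas' : pvMeas N (fa.setIfInBounds x (pvRt N fa x)) m := by
      intro z hz hne
      rw [hpt] at hne ⊢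
      by_cases hzx : z = x
      · subst hzx
        rw [if_pos rfl]
        exact hmr
      · rw [if_neg hzx] at hne ⊢
        exact hm z hz hne
    have hroots : ∀ y, y < N → pvRt N (fa.setIfInBounds x (pvRt N fa x)) y = pvRt N fa y := by
      have aux : ∀ k y, y < N → pvStep fa ((pvStep fa)^[k] y) = (pvStep fa)^[k] y →
          pvRt N (fa.setIfInBounds x (pvRt N fa x)) y = pvRt N fa y := by
        intro k
        induction k using Nat.strong_induction_on with
        | _ k ihk =>
          intro y hy hfixy
          by_cases hyf : fa.getD y y = y
          · have hyx : y ≠ x := fun h => hfx (h ▸ hyf)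
            have h1 : (fa.setIfInBounds x (pvRt N fa x)).getD y y = y := by
              rw [hpt, if_neg hyx]; exact hyf
            show pvRootF N _ y = pvRootF N fa y
            rw [pvRootF_fix hyf, pvRootF_fix h1]
          · by_cases hyx : y = x
            · subst hyx
              have hpx : (fa.setIfInBounds y (pvRt N fa y)).getD y y = pvRt N fa y := by
                rw [hpt, if_pos rfl]
              have hrfix' : (fa.setIfInBounds y (pvRt N fa y)).getD (pvRt N fa y) (pvRt N fa y)
                  = pvRt N fa y := by
                rw [hpt, if_neg hrne]; exact hfix
              have h2 : pvRt N (fa.setIfInBounds y (pvRt N fa y)) (pvRt N fa y)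
                  = pvRt N (fa.setIfInBounds y (pvRt N fa y)) y := by
                have := pvRt_parent hbnd' hmeas' hy (by rw [hpx]; exact hrne)
                rw [hpx] at this
                exact this
              rw [← h2]
              show pvRootF N _ _ = _
              rw [pvRootF_fix hrfix']
            · have hpy : (fa.setIfInBounds x (pvRt N fa x)).getD y y = fa.getD y y := by
                rw [hpt, if_neg hyx]
              have hk1 : k ≠ 0 := by
                intro h0
                subst h0
                simp only [Function.iterate_zero_apply] at hfixy
                exact hyf hfixy
              obtain ⟨k', rfl⟩ : ∃ k', k = k' + 1 := ⟨k - 1, by omega⟩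
              have hfix' : pvStep fa ((pvStep fa)^[k'] (pvStep fa y)) =
                  (pvStep fa)^[k'] (pvStep fa y) := by
                rw [← Function.iterate_succ_apply]
                exact hfixy
              have hplt : fa.getD y y < N := hb.2 y hy
              have e1 : pvRt N fa (fa.getD y y) = pvRt N fa y := pvRt_parent hb hm hy hyf
              have e2 : pvRt N (fa.setIfInBounds x (pvRt N fa x)) (fa.getD y y) =
                  pvRt N (fa.setIfInBounds x (pvRt N fa x)) y := by
                have := pvRt_parent hbnd' hmeas' hy (by rw [hpy]; exact hyf)
                rw [hpy] at this
                exact this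
              rw [← e1, ← e2]
              exact ihk k' (by omega) (fa.getD y y) hplt hfix'
      intro y hy
      obtain ⟨k, _, hfixy⟩ := pvExists_fix hb hm hy
      exact aux k y hy hfixy
    exact ⟨hbnd', hmeas', hroots⟩

-- linking two roots merges exactly their two classes
theorem pvLink {N : Nat} {fa : Array Nat} {m : Nat → Nat}
    (hb : pvBnd N fa) (hm : pvMeas N fa m) {a b : Nat} (ha : a < N) (hbN : b < N)
    (hfa : fa.getD a a = a) (hfb : fa.getD b b = b) :
    pvBnd N (fa.setIfInBounds a b) ∧
    pvMeas N (fa.setIfInBounds a b) (fun y => if pvRt N fa y = a then m y + (m b + 1) else m y) ∧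
    ∀ y, y < N → pvRt N (fa.setIfInBounds a b) y =
      if pvRt N fa y = a then b else pvRt N fa y := by
  have hsz : a < fa.size := by rw [hb.1]; exact ha
  have hpt : ∀ z, (fa.setIfInBounds a b).getD z z = if z = a then b else fa.getD z z := by
    intro z
    by_cases hz : z = a
    · subst hz; rw [if_pos rfl]; exact pvGetD_set_self _ _ _ _ hsz
    · rw [if_neg hz]; exact pvGetD_set_ne _ _ _ _ _ hz
  have hra : pvRt N fa a = a := pvRootF_fix hfa N
  have hrb : pvRt N fa b = b := pvRootF_fix hfb N
  by_cases hab : a = b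
  · subst hab
    have hpt' : ∀ z, (fa.setIfInBounds a a).getD z z = fa.getD z z := by
      intro z
      rw [hpt]
      split_ifs with hz
      · subst hz; exact hfa.symm
      · rfl
    refine ⟨⟨by simp [hb.1], fun z hz => by rw [hpt']; exact hb.2 z hz⟩, ?_, ?_⟩
    · intro z hz hne
      rw [hpt'] at hne
      have hlt := hm z hz hne
      have e : pvRt N fa (fa.getD z z) = pvRt N fa z := pvRt_parent hb hm hz hne
      simp only [hpt']
      rw [e]
      split_ifs <;> omega
    · intro y hy
      have hcg : pvRt N (fa.setIfInBounds a a) y = pvRt N fa y := pvRootF_congr hpt' N y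
      rw [hcg]
      split_ifs with h1
      · exact h1
      · rfl
  · have hbnd' : pvBnd N (fa.setIfInBounds a b) := by
      refine ⟨by simp [hb.1], fun z hz => ?_⟩
      rw [hpt]
      split_ifs
      · exact hbN
      · exact hb.2 z hz
    have hmeas' : pvMeas N (fa.setIfInBounds a b)
        (fun y => if pvRt N fa y = a then m y + (m b + 1) else m y) := by
      intro z hz hne
      simp only [hpt] at hne ⊢
      by_cases hza : z = a
      · rw [if_pos hza] at hne ⊢
        have hza' : pvRt N fa z = a := by rw [hza]; exact hra
        rw [hrb, hza']
        rw [if_neg (fun h : b = a => hab h.symm), if_pos rfl]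
        omega
      · rw [if_neg hza] at hne ⊢
        have e : pvRt N fa (fa.getD z z) = pvRt N fa z := pvRt_parent hb hm hz hne
        have hlt := hm z hz hne
        rw [e]
        split_ifs <;> omega
    have hroots : ∀ y, y < N → pvRt N (fa.setIfInBounds a b) y =
        if pvRt N fa y = a then b else pvRt N fa y := by
      have aux : ∀ k y, y < N → pvStep fa ((pvStep fa)^[k] y) = (pvStep fa)^[k] y →
          pvRt N (fa.setIfInBounds a b) y = if pvRt N fa y = a then b else pvRt N fa y := by
        intro k
        induction k using Nat.strong_induction_on with
        | _ k ihk =>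
          intro y hy hfixy
          by_cases hyf : fa.getD y y = y
          · have hry : pvRt N fa y = y := pvRootF_fix hyf N
            by_cases hya : y = a
            · subst hya
              have hpb : (fa.setIfInBounds y b).getD y y = b := by rw [hpt, if_pos rfl]
              have hbfix : (fa.setIfInBounds y b).getD b b = b := by
                rw [hpt, if_neg (fun h : b = y => hab h.symm)]
                exact hfb
              have h2 : pvRt N (fa.setIfInBounds y b) b = pvRt N (fa.setIfInBounds y b) y := by
                have := pvRt_parent hbnd' hmeas' hy
                  (by rw [hpb]; exact fun h : b = y => hab h.symm)
                rw [hpb] at this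
                exact this
              rw [hry, if_pos rfl, ← h2]
              show pvRootF N _ b = b
              rw [pvRootF_fix hbfix]
            · have h1 : (fa.setIfInBounds a b).getD y y = y := by rw [hpt, if_neg hya]; exact hyf
              rw [hry, if_neg hya]
              show pvRootF N _ y = y
              rw [pvRootF_fix h1]
          · have hya : y ≠ a := fun h => hyf (h ▸ hfa)
            have hpy : (fa.setIfInBounds a b).getD y y = fa.getD y y := by rw [hpt, if_neg hya]
            have hk1 : k ≠ 0 := by
              intro h0
              subst h0
              simp only [Function.iterate_zero_apply] at hfixy
              exact hyf hfixy
            obtain ⟨k', rfl⟩ : ∃ k', k = k' + 1 := ⟨k - 1, by omega⟩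
            have hfix' : pvStep fa ((pvStep fa)^[k'] (pvStep fa y)) =
                (pvStep fa)^[k'] (pvStep fa y) := by
              rw [← Function.iterate_succ_apply]
              exact hfixy
            have hplt : fa.getD y y < N := hb.2 y hy
            have e1 : pvRt N fa (fa.getD y y) = pvRt N fa y := pvRt_parent hb hm hy hyf
            have e2 : pvRt N (fa.setIfInBounds a b) (fa.getD y y) =
                pvRt N (fa.setIfInBounds a b) y := by
              have := pvRt_parent hbnd' hmeas' hy (by rw [hpy]; exact hyf)
              rw [hpy] at this
              exact this
            rw [← e2, ← e1]
            exact ihk k' (by omega) (fa.getD y y) hplt hfix'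
      intro y hy
      obtain ⟨k, _, hfixy⟩ := pvExists_fix hb hm hy
      exact aux k y hy hfixy
    exact ⟨hbnd', hmeas', hroots⟩

theorem pvFind_spec_aux {N : Nat} {fa : Array Nat} {m : Nat → Nat}
    (hb : pvBnd N fa) (hm : pvMeas N fa m) :
    ∀ f x, x < N → (∃ k, k < f ∧ pvStep fa ((pvStep fa)^[k] x) = (pvStep fa)^[k] x) →
      (pvFind f fa x).2 = pvRt N fa x ∧ pvBnd N (pvFind f fa x).1 ∧
      pvMeas N (pvFind f fa x).1 m ∧
      ∀ y, y < N → pvRt N (pvFind f fa x).1 y = pvRt N fa y := by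
  intro f
  induction f with
  | zero =>
    rintro x hx ⟨k, hk, -⟩
    omega
  | succ f ih =>
    rintro x hx ⟨k, hk, hfix⟩
    by_cases hpx : fa.getD x x = x
    · have heq : pvFind (f + 1) fa x = (fa, x) := by
        simp only [pvFind]
        rw [if_pos hpx]
      rw [heq]
      exact ⟨(pvRootF_fix hpx N).symm, hb, hm, fun y _ => rfl⟩
    · have hk1 : k ≠ 0 := by
        intro h0
        subst h0
        simp only [Function.iterate_zero_apply] at hfix
        exact hpx hfix
      obtain ⟨k', rfl⟩ : ∃ k', k = k' + 1 := ⟨k - 1, by omega⟩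
      have hplt : fa.getD x x < N := hb.2 x hx
      have hfix' : pvStep fa ((pvStep fa)^[k'] (pvStep fa x)) = (pvStep fa)^[k'] (pvStep fa x) := by
        rw [← Function.iterate_succ_apply]
        exact hfix
      obtain ⟨ih2, ihb, ihm, ihroots⟩ := ih (fa.getD x x) hplt ⟨k', by omega, hfix'⟩
      have heq : pvFind (f + 1) fa x =
          ((pvFind f fa (fa.getD x x)).1.setIfInBounds x (pvFind f fa (fa.getD x x)).2,
           (pvFind f fa (fa.getD x x)).2) := by
        simp only [pvFind]
        rw [if_neg hpx]
      rw [heq]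
      have hrtp : pvRt N fa (fa.getD x x) = pvRt N fa x := pvRt_parent hb hm hx hpx
      have hr2 : (pvFind f fa (fa.getD x x)).2 = pvRt N (pvFind f fa (fa.getD x x)).1 x := by
        rw [ih2, hrtp, ← ihroots x hx]
      obtain ⟨cb, cm, croots⟩ := pvCompress ihb ihm hx
      refine ⟨by simpa using (by rw [ih2, hrtp] : (pvFind f fa (fa.getD x x)).2 = pvRt N fa x),
        ?_, ?_, ?_⟩
      · show pvBnd N ((pvFind f fa (fa.getD x x)).1.setIfInBounds x (pvFind f fa (fa.getD x x)).2)
        rw [hr2]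
        exact cb
      · show pvMeas N ((pvFind f fa (fa.getD x x)).1.setIfInBounds x (pvFind f fa (fa.getD x x)).2) m
        rw [hr2]
        exact cm
      · intro y hy
        show pvRt N ((pvFind f fa (fa.getD x x)).1.setIfInBounds x (pvFind f fa (fa.getD x x)).2) y
          = pvRt N fa y
        rw [hr2, croots y hy, ihroots y hy]

theorem pvFind_spec {N : Nat} {fa : Array Nat} {m : Nat → Nat}
    (hb : pvBnd N fa) (hm : pvMeas N fa m) {x : Nat} (hx : x < N) :
    (pvFind N fa x).2 = pvRt N fa x ∧ pvBnd N (pvFind N fa x).1 ∧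
    pvMeas N (pvFind N fa x).1 m ∧
    ∀ y, y < N → pvRt N (pvFind N fa x).1 y = pvRt N fa y := by
  refine pvFind_spec_aux hb hm N x hx ?_
  exact pvExists_fix hb hm hx

theorem pvUnionA_spec {N : Nat} {fa : Array Nat} {m : Nat → Nat}
    (hb : pvBnd N fa) (hm : pvMeas N fa m) {a b : Nat} (ha : a < N) (hbN : b < N) :
    ∃ m', pvBnd N (pvUnionA N a b fa) ∧ pvMeas N (pvUnionA N a b fa) m' ∧
      ∀ y, y < N → pvRt N (pvUnionA N a b fa) y =
        if pvRt N fa y = pvRt N fa a then pvRt N fa b else pvRt N fa y := by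
  obtain ⟨h12, h1b, h1m, h1r⟩ := pvFind_spec hb hm hbN
  obtain ⟨h22, h2b, h2m, h2r⟩ := pvFind_spec h1b h1m ha
  have hblt : pvRt N fa b < N := pvRt_lt hb hbN
  have halt : pvRt N fa a < N := pvRt_lt hb ha
  have hra1 : (pvFind N (pvFind N fa b).1 a).2 = pvRt N fa a := by
    rw [h22, h1r a ha]
  have hafix : (pvFind N (pvFind N fa b).1 a).1.getD
      (pvFind N (pvFind N fa b).1 a).2 (pvFind N (pvFind N fa b).1 a).2 =
      (pvFind N (pvFind N fa b).1 a).2 := by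
    apply pvFixed_of_rt_self h2b h2m (by rw [hra1]; exact halt)
    rw [hra1, h2r _ halt, h1r _ halt]
    exact pvRt_idem hb hm ha
  have hbfix : (pvFind N (pvFind N fa b).1 a).1.getD
      (pvFind N fa b).2 (pvFind N fa b).2 = (pvFind N fa b).2 := by
    rw [h12]
    apply pvFixed_of_rt_self h2b h2m hblt
    rw [h2r _ hblt, h1r _ hblt]
    exact pvRt_idem hb hm hbN
  have h12' : (pvFind N fa b).2 < N := by rw [h12]; exact hblt
  have h22' : (pvFind N (pvFind N fa b).1 a).2 < N := by rw [hra1]; exact halt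
  obtain ⟨lb, lm, lr⟩ := pvLink h2b h2m h22' h12' hafix hbfix
  refine ⟨_, lb, lm, ?_⟩
  intro y hy
  have hgoal : pvUnionA N a b fa =
      (pvFind N (pvFind N fa b).1 a).1.setIfInBounds (pvFind N (pvFind N fa b).1 a).2
        (pvFind N fa b).2 := rfl
  rw [hgoal]
  have hthis := lr y hy
  rw [h2r y hy, h1r y hy] at hthis
  rw [hthis, hra1, h12]

-- ===== B-side semantics =====
def pvCBnd (N : Nat) (st : Array Nat × Array (List Nat)) : Prop :=
  st.1.size = N ∧ st.2.size = N ∧ (∀ x, x < N → st.1.getD x x < N) ∧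
  ∀ l, l < N → ∀ x : Nat, x ∈ st.2.getD l [] ↔ (x < N ∧ st.1.getD x x = l)

theorem pvRelabel_size (l : List Nat) (t : Nat) :
    ∀ comp : Array Nat, (l.foldl (fun c x => c.setIfInBounds x t) comp).size = comp.size := by
  induction l with
  | nil => intro comp; rfl
  | cons a l ih => intro comp; simp [List.foldl_cons, ih]

theorem pvRelabel_getD (l : List Nat) (t : Nat) :
    ∀ comp : Array Nat, (∀ x ∈ l, x < comp.size) →
      ∀ y, (l.foldl (fun c x => c.setIfInBounds x t) comp).getD y y =
        if y ∈ l then t else comp.getD y y := by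
  induction l with
  | nil => intro comp _ y; simp
  | cons a l ih =>
    intro comp hlt y
    simp only [List.foldl_cons]
    rw [ih (comp.setIfInBounds a t)
      (fun x hx => by rw [Array.size_setIfInBounds]; exact hlt x (List.mem_cons_of_mem a hx))]
    by_cases hy : y ∈ l
    · rw [if_pos hy, if_pos (List.mem_cons_of_mem a hy)]
    · rw [if_neg hy]
      by_cases hya : y = a
      · subst hya
        rw [if_pos List.mem_cons_self]
        exact pvGetD_set_self _ _ _ _ (hlt y List.mem_cons_self)
      · rw [if_neg (by simp [hya, hy])]
        exact pvGetD_set_ne _ _ _ _ _ hya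

theorem pvMergeIff {N : Nat} (f f' : Nat → Nat) (s t : Nat)
    (h : ∀ u, u < N → f' u = if f u = s then t else f u) :
    ∀ u v, u < N → v < N →
      (f' u = f' v ↔ (f u = f v ∨ ((f u = s ∨ f u = t) ∧ (f v = s ∨ f v = t)))) := by
  intro u v hu hv
  rw [h u hu, h v hv]
  split_ifs with h1 h2 h2 <;> constructor <;> intro hh <;> (try tauto) <;>
    (rcases hh with hh | ⟨hh1 | hh1, hh2 | hh2⟩ <;> omega)

theorem pvDoMerge_spec {N : Nat} {st : Array Nat × Array (List Nat)}
    (hc1 : st.1.size = N) (hc2 : st.2.size = N) (hc3 : ∀ x, x < N → st.1.getD x x < N)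
    (hc4 : ∀ l, l < N → ∀ x : Nat, x ∈ st.2.getD l [] ↔ (x < N ∧ st.1.getD x x = l))
    {s t : Nat} (hsN : s < N) (htN : t < N) (hst : s ≠ t) :
    (∀ y, y < N → (pvDoMerge s t st).1.getD y y =
      if st.1.getD y y = s then t else st.1.getD y y) ∧
    pvCBnd N (pvDoMerge s t st) := by
  have hsub : ∀ x ∈ st.2.getD s [], x < N ∧ st.1.getD x x = s :=
    fun x hx => (hc4 s hsN x).1 hx
  have hszb : ∀ x ∈ st.2.getD s [], x < st.1.size :=
    fun x hx => by rw [hc1]; exact (hsub x hx).1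
  have hpt : ∀ y, y < N → (pvDoMerge s t st).1.getD y y =
      if st.1.getD y y = s then t else st.1.getD y y := by
    intro y hy
    show ((st.2.getD s []).foldl (fun c x => c.setIfInBounds x t) st.1).getD y y = _
    rw [pvRelabel_getD _ _ _ hszb y]
    by_cases hmem : y ∈ st.2.getD s []
    · rw [if_pos hmem, if_pos (hsub y hmem).2]
    · rw [if_neg hmem, if_neg (fun hcc => hmem ((hc4 s hsN y).2 ⟨hy, hcc⟩))]
  refine ⟨hpt, ?_, ?_, ?_, ?_⟩
  · show ((st.2.getD s []).foldl (fun c x => c.setIfInBounds x t) st.1).size = N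
    rw [pvRelabel_size, hc1]
  · show ((st.2.setIfInBounds t _).setIfInBounds s []).size = N
    simp [hc2]
  · intro x hx
    rw [hpt x hx]
    split_ifs
    · exact htN
    · exact hc3 x hx
  · intro l hl x
    show x ∈ ((st.2.setIfInBounds t (st.2.getD t [] ++ st.2.getD s [])).setIfInBounds s []).getD l []
      ↔ _
    by_cases hls : l = s
    · subst hls
      rw [pvGetD_set_self _ _ _ _ (by simp [hc2]; exact hsN)]
      simp only [List.not_mem_nil, false_iff]
      rintro ⟨hxN, hcx⟩
      rw [hpt x hxN] at hcx
      by_cases hg : st.1.getD x x = l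
      · rw [if_pos hg] at hcx; exact hst hcx.symm
      · rw [if_neg hg] at hcx; exact hg hcx
    · rw [pvGetD_set_ne _ _ _ _ _ hls]
      by_cases hlt : l = t
      · subst hlt
        rw [pvGetD_set_self _ _ _ _ (by rw [hc2]; exact htN)]
        rw [List.mem_append]
        constructor
        · rintro (hx | hx)
          · obtain ⟨hxN, hg⟩ := (hc4 l htN x).1 hx
            refine ⟨hxN, ?_⟩
            rw [hpt x hxN, if_neg (by rw [hg]; exact fun h => hst h.symm), hg]
          · obtain ⟨hxN, hg⟩ := (hc4 s hsN x).1 hx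
            refine ⟨hxN, ?_⟩
            rw [hpt x hxN, if_pos hg]
        · rintro ⟨hxN, hcx⟩
          rw [hpt x hxN] at hcx
          by_cases hg : st.1.getD x x = s
          · exact Or.inr ((hc4 s hsN x).2 ⟨hxN, hg⟩)
          · rw [if_neg hg] at hcx
            exact Or.inl ((hc4 l htN x).2 ⟨hxN, hcx⟩)
      · rw [pvGetD_set_ne _ _ _ _ _ hlt, hc4 l hl x]
        constructor
        · rintro ⟨hxN, hg⟩
          refine ⟨hxN, ?_⟩
          rw [hpt x hxN, if_neg (by rw [hg]; exact hls), hg]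
        · rintro ⟨hxN, hcx⟩
          rw [hpt x hxN] at hcx
          refine ⟨hxN, ?_⟩
          by_cases hg : st.1.getD x x = s
          · rw [if_pos hg] at hcx; exact absurd hcx.symm hlt
          · rw [if_neg hg] at hcx; exact hcx

set_option maxHeartbeats 1000000 in
theorem pvMergeB_spec {N : Nat} {st : Array Nat × Array (List Nat)}
    (hc : pvCBnd N st) {a b : Nat} (ha : a < N) (hb : b < N) :
    pvCBnd N (pvMergeB N a b st) ∧
    ∀ u v, u < N → v < N →
      ((pvMergeB N a b st).1.getD u u = (pvMergeB N a b st).1.getD v v ↔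
        (st.1.getD u u = st.1.getD v v ∨
          ((st.1.getD u u = st.1.getD a a ∨ st.1.getD u u = st.1.getD b b) ∧
           (st.1.getD v v = st.1.getD a a ∨ st.1.getD v v = st.1.getD b b)))) := by
  obtain ⟨hc1, hc2, hc3, hc4⟩ := hc
  by_cases heq : st.1.getD a a = st.1.getD b b
  · have hme : pvMergeB N a b st = st := by
      simp only [pvMergeB]
      rw [if_pos heq]
    rw [hme]
    refine ⟨⟨hc1, hc2, hc3, hc4⟩, fun u v hu hv => ?_⟩
    constructor
    · exact Or.inl
    · rintro (h | ⟨h1 | h1, h2 | h2⟩) <;> omega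
  · have hlaN : st.1.getD a a < N := hc3 a ha
    have hlbN : st.1.getD b b < N := hc3 b hb
    by_cases hsz : (st.2.getD (st.1.getD a a) []).length > (st.2.getD (st.1.getD b b) []).length
    · have hme : pvMergeB N a b st = pvDoMerge (st.1.getD b b) (st.1.getD a a) st := by
        simp only [pvMergeB]
        rw [if_neg heq, if_pos hsz]
      obtain ⟨hpt, hcb⟩ := pvDoMerge_spec hc1 hc2 hc3 hc4 hlbN hlaN (Ne.symm heq)
      rw [hme]
      refine ⟨hcb, fun u v hu hv => ?_⟩
      have hiff := pvMergeIff (N := N) (fun y => st.1.getD y y)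
        (fun y => (pvDoMerge (st.1.getD b b) (st.1.getD a a) st).1.getD y y)
        (st.1.getD b b) (st.1.getD a a) hpt u v hu hv
      exact hiff.trans (by constructor <;> (rintro (h | ⟨h1, h2⟩) <;> tauto))
    · have hme : pvMergeB N a b st = pvDoMerge (st.1.getD a a) (st.1.getD b b) st := by
        simp only [pvMergeB]
        rw [if_neg heq, if_neg hsz]
      obtain ⟨hpt, hcb⟩ := pvDoMerge_spec hc1 hc2 hc3 hc4 hlaN hlbN heq
      rw [hme]
      refine ⟨hcb, fun u v hu hv => ?_⟩
      exact pvMergeIff (N := N) (fun y => st.1.getD y y)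
        (fun y => (pvDoMerge (st.1.getD a a) (st.1.getD b b) st).1.getD y y)
        (st.1.getD a a) (st.1.getD b b) hpt u v hu hv

-- ===== the bridge =====
def pvRel (N : Nat) (fa : Array Nat) (comp : Array Nat) : Prop :=
  ∀ u v, u < N → v < N → (pvRt N fa u = pvRt N fa v ↔ comp.getD u u = comp.getD v v)

theorem pvRel_congr {N : Nat} {fa fb comp : Array Nat}
    (h : ∀ y, y < N → pvRt N fa y = pvRt N fb y) (hr : pvRel N fa comp) : pvRel N fb comp := by
  intro u v hu hv
  rw [← h u hu, ← h v hv]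
  exact hr u v hu hv

theorem pvBridge {au av aa ab cu cv ca cb : Nat}
    (e1 : au = av ↔ cu = cv) (e2 : au = aa ↔ cu = ca) (e3 : au = ab ↔ cu = cb)
    (e4 : av = aa ↔ cv = ca) (e5 : av = ab ↔ cv = cb) :
    ((au = av ∨ ((au = aa ∨ au = ab) ∧ (av = aa ∨ av = ab))) ↔
     (cu = cv ∨ ((cu = ca ∨ cu = cb) ∧ (cv = ca ∨ cv = cb)))) := by
  tauto

theorem pvStep_sim {N : Nat} {fa : Array Nat} {m : Nat → Nat} {st : Array Nat × Array (List Nat)}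
    (hb : pvBnd N fa) (hm : pvMeas N fa m) (hc : pvCBnd N st) (hr : pvRel N fa st.1)
    {a b : Nat} (ha : a < N) (hbN : b < N) :
    ∃ m', pvBnd N (pvUnionA N a b fa) ∧ pvMeas N (pvUnionA N a b fa) m' ∧
      pvCBnd N (pvMergeB N a b st) ∧ pvRel N (pvUnionA N a b fa) (pvMergeB N a b st).1 := by
  obtain ⟨m', ub, um, uroots⟩ := pvUnionA_spec hb hm ha hbN
  obtain ⟨mc, miff⟩ := pvMergeB_spec hc ha hbN
  refine ⟨m', ub, um, mc, ?_⟩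
  intro u v hu hv
  have hiff1 := pvMergeIff (N := N) (pvRt N fa) (pvRt N (pvUnionA N a b fa))
    (pvRt N fa a) (pvRt N fa b) uroots u v hu hv
  have hiff2 := miff u v hu hv
  rw [hiff1, hiff2]
  exact pvBridge (hr u v hu hv) (hr u a hu ha) (hr u b hu hbN) (hr v a hv ha) (hr v b hv hbN)

def pvInR (n : Nat) (c : Int × Int) : Prop :=
  0 ≤ c.1 ∧ c.1 < (n : Int) ∧ 0 ≤ c.2 ∧ c.2 < (n : Int)

theorem pvIdx_lt {n : Nat} {c : Int × Int} (h : pvInR n c) : pvIdx n c < n * n := by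
  obtain ⟨c1, c2⟩ := c
  obtain ⟨h1, h2, h3, h4⟩ := h
  obtain ⟨i, rfl⟩ := Int.eq_ofNat_of_zero_le h1
  obtain ⟨j, rfl⟩ := Int.eq_ofNat_of_zero_le h3
  simp only at h2 h4
  have hi : i < n := by exact_mod_cast h2
  have hj : j < n := by exact_mod_cast h4
  have : pvIdx n ((i : Int), (j : Int)) = i * n + j := by
    simp [pvIdx]
    rw [show ((i : Int) * (n : Int) + (j : Int)) = ((i * n + j : Nat) : Int) by push_cast; ring]
    exact Int.toNat_natCast _
  rw [this]
  calc i * n + j < i * n + n := by omega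
    _ = (i + 1) * n := by ring
    _ ≤ n * n := Nat.mul_le_mul_right n (by omega)

theorem pvFoldNbr_sim {n N : Nat} (hN : N = n * n) (dis : Array (Array Int)) (c : Int × Int)
    (hc : pvInR n c) :
    ∀ (l : List (Int × Int)) (fa : Array Nat) (st : Array Nat × Array (List Nat)) (m : Nat → Nat),
      pvBnd N fa → pvMeas N fa m → pvCBnd N st → pvRel N fa st.1 →
      ∃ m', pvBnd N (l.foldl (fun fa xy =>
          if 0 ≤ xy.1 ∧ xy.1 < (n : Int) ∧ 0 ≤ xy.2 ∧ xy.2 < (n : Int) ∧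
              pvDisGet dis xy.1 xy.2 ≥ pvDisGet dis c.1 c.2 then
            pvUnionA N (pvIdx n xy) (pvIdx n c) fa
          else fa) fa) ∧
        pvMeas N (l.foldl (fun fa xy =>
          if 0 ≤ xy.1 ∧ xy.1 < (n : Int) ∧ 0 ≤ xy.2 ∧ xy.2 < (n : Int) ∧
              pvDisGet dis xy.1 xy.2 ≥ pvDisGet dis c.1 c.2 then
            pvUnionA N (pvIdx n xy) (pvIdx n c) fa
          else fa) fa) m' ∧
        pvCBnd N (l.foldl (fun st xy =>
          if 0 ≤ xy.1 ∧ xy.1 < (n : Int) ∧ 0 ≤ xy.2 ∧ xy.2 < (n : Int) ∧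
              pvDisGet dis xy.1 xy.2 ≥ pvDisGet dis c.1 c.2 then
            pvMergeB N (pvIdx n xy) (pvIdx n c) st
          else st) st) ∧
        pvRel N (l.foldl (fun fa xy =>
          if 0 ≤ xy.1 ∧ xy.1 < (n : Int) ∧ 0 ≤ xy.2 ∧ xy.2 < (n : Int) ∧
              pvDisGet dis xy.1 xy.2 ≥ pvDisGet dis c.1 c.2 then
            pvUnionA N (pvIdx n xy) (pvIdx n c) fa
          else fa) fa)
          ((l.foldl (fun st xy =>
          if 0 ≤ xy.1 ∧ xy.1 < (n : Int) ∧ 0 ≤ xy.2 ∧ xy.2 < (n : Int) ∧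
              pvDisGet dis xy.1 xy.2 ≥ pvDisGet dis c.1 c.2 then
            pvMergeB N (pvIdx n xy) (pvIdx n c) st
          else st) st)).1 := by
  intro l
  induction l with
  | nil => intro fa st m hb hm hcb hr; exact ⟨m, hb, hm, hcb, hr⟩
  | cons xy l ih =>
    intro fa st m hb hm hcb hr
    simp only [List.foldl_cons]
    by_cases hcond : 0 ≤ xy.1 ∧ xy.1 < (n : Int) ∧ 0 ≤ xy.2 ∧ xy.2 < (n : Int) ∧
        pvDisGet dis xy.1 xy.2 ≥ pvDisGet dis c.1 c.2
    · rw [if_pos hcond, if_pos hcond]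
      have hxyR : pvInR n xy := ⟨hcond.1, hcond.2.1, hcond.2.2.1, hcond.2.2.2.1⟩
      obtain ⟨m2, b2, m2', c2, r2⟩ := pvStep_sim hb hm hcb hr
        (by rw [hN]; exact pvIdx_lt hxyR) (by rw [hN]; exact pvIdx_lt hc)
      exact ih _ _ m2 b2 m2' c2 r2
    · rw [if_neg hcond, if_neg hcond]
      exact ih fa st m hb hm hcb hr

theorem pvFold_sim {n N : Nat} (hN : N = n * n) (dis : Array (Array Int)) :
    ∀ (cells : List (Int × Int)) (fa : Array Nat) (st : Array Nat × Array (List Nat)) (m : Nat → Nat),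
      pvBnd N fa → pvMeas N fa m → pvCBnd N st → pvRel N fa st.1 →
      (∀ c ∈ cells, pvInR n c) →
      ∃ m', pvBnd N (pvProcessA n N dis cells fa) ∧ pvMeas N (pvProcessA n N dis cells fa) m' ∧
        pvCBnd N (pvProcessB n N dis cells st) ∧
        pvRel N (pvProcessA n N dis cells fa) (pvProcessB n N dis cells st).1 := by
  intro cells
  induction cells with
  | nil => intro fa st m hb hm hcb hr _; exact ⟨m, hb, hm, hcb, hr⟩
  | cons c cells ih =>
    intro fa st m hb hm hcb hr hcl
    have hcR : pvInR n c := hcl c List.mem_cons_self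
    have hstep := pvFoldNbr_sim hN dis c hcR (pvNbrs c) fa st m hb hm hcb hr
    obtain ⟨m2, b2, m2', c2, r2⟩ := hstep
    have hrest := ih _ _ m2 b2 m2' c2 r2 (fun x hx => hcl x (List.mem_cons_of_mem c hx))
    simpa only [pvProcessA, pvProcessB, List.foldl_cons] using hrest

theorem pvLoop_sim {n N : Nat} (hN : N = n * n) (groups : List (List (Int × Int)))
    (dis : Array (Array Int)) :
    ∀ (ds : List Int) (fa : Array Nat) (st : Array Nat × Array (List Nat)) (m : Nat → Nat),
      pvBnd N fa → pvMeas N fa m → pvCBnd N st → pvRel N fa st.1 →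
      (∀ d ∈ ds, 0 < n ∧ ∀ c ∈ groups.getD d.toNat [], pvInR n c) →
      pvLoopA n N groups dis ds fa = pvLoopB n N groups dis ds st := by
  intro ds
  induction ds with
  | nil => intro fa st m _ _ _ _ _; rfl
  | cons d ds ih =>
    intro fa st m hb hm hcb hr hds
    obtain ⟨hn0, hcells⟩ := hds d List.mem_cons_self
    obtain ⟨m2, b2, m2', c2, r2⟩ :=
      pvFold_sim hN dis (groups.getD d.toNat []) fa st m hb hm hcb hr hcells
    have hN0 : 0 < N := by rw [hN]; exact Nat.mul_pos hn0 hn0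
    obtain ⟨f02, f0b, f0m, f0r⟩ := pvFind_spec b2 m2' (x := 0) hN0
    obtain ⟨f12, f1b, f1m, f1r⟩ := pvFind_spec f0b f0m (x := N - 1) (by omega)
    simp only [pvLoopA, pvLoopB]
    have hcnd : ((pvFind N (pvProcessA n N dis (groups.getD d.toNat []) fa) 0).2 =
        (pvFind N (pvFind N (pvProcessA n N dis (groups.getD d.toNat []) fa) 0).1 (N - 1)).2) ↔
        ((pvProcessB n N dis (groups.getD d.toNat []) st).1.getD 0 0 =
         (pvProcessB n N dis (groups.getD d.toNat []) st).1.getD (N - 1) (N - 1)) := by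
      rw [f02, f12, f0r _ (by omega)]
      exact r2 0 (N - 1) hN0 (by omega)
    by_cases hA : (pvFind N (pvProcessA n N dis (groups.getD d.toNat []) fa) 0).2 =
        (pvFind N (pvFind N (pvProcessA n N dis (groups.getD d.toNat []) fa) 0).1 (N - 1)).2
    · rw [if_pos hA, if_pos (hcnd.mp hA)]
    · rw [if_neg hA, if_neg (fun h => hA (hcnd.mpr h))]
      exact ih _ _ m2 f1b f1m c2
        (pvRel_congr (fun y hy => ((f1r y hy).trans (f0r y hy)).symm) r2)
        (fun d' hd' => hds d' (List.mem_cons_of_mem d hd'))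

-- phase-1: every cell in groups[k], k ≥ 1, passed the bounds check
theorem pvBfsInner_inR {n L : Nat} :
    ∀ (l : List (Int × Int)) (acc : List (Int × Int) × Array (Array Int)),
      (∀ c ∈ acc.1, pvInR n c) →
      ∀ c' ∈ (l.foldl (fun acc xy =>
          if 0 ≤ xy.1 ∧ xy.1 < (n : Int) ∧ 0 ≤ xy.2 ∧ xy.2 < (n : Int) ∧
              pvDisGet acc.2 xy.1 xy.2 < 0 then
            (acc.1 ++ [xy], pvDisSet acc.2 xy.1 xy.2 (L : Int))
          else acc) acc).1, pvInR n c' := by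
  intro l
  induction l with
  | nil => intro acc h c hc; exact h c hc
  | cons xy l ih =>
    intro acc h
    simp only [List.foldl_cons]
    by_cases hcond : 0 ≤ xy.1 ∧ xy.1 < (n : Int) ∧ 0 ≤ xy.2 ∧ xy.2 < (n : Int) ∧
        pvDisGet acc.2 xy.1 xy.2 < 0
    · rw [if_pos hcond]
      apply ih
      intro c hc
      rcases List.mem_append.mp hc with h1 | h1
      · exact h c h1
      · have : c = xy := by simpa using h1
        subst this
        exact ⟨hcond.1, hcond.2.1, hcond.2.2.1, hcond.2.2.2.1⟩
    · rw [if_neg hcond]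
      exact ih acc h

theorem pvBfsStep_inR {n L : Nat} {tmp : List (Int × Int)} {dis : Array (Array Int)} :
    ∀ c ∈ (pvBfsStep n L tmp dis).1, pvInR n c := by
  have aux : ∀ (tmp' : List (Int × Int)) (acc : List (Int × Int) × Array (Array Int)),
      (∀ c ∈ acc.1, pvInR n c) → ∀ c ∈ (tmp'.foldl (pvBfsInner n L) acc).1, pvInR n c := by
    intro tmp'
    induction tmp' with
    | nil => intro acc h c hc; exact h c hc
    | cons c0 tmp' ih =>
      intro acc h
      simp only [List.foldl_cons]
      exact ih _ (pvBfsInner_inR (pvNbrs c0) acc h)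
  exact aux tmp ([], dis) (by simp)

theorem pvBfs_groups_inR {n : Nat} :
    ∀ (fuel : Nat) (q : List (Int × Int)) (groups : List (List (Int × Int))) (dis : Array (Array Int)),
      (∀ k, 1 ≤ k → ∀ c ∈ groups.getD k [], pvInR n c) →
      ∀ k, 1 ≤ k → ∀ c ∈ (pvBfs n fuel q groups dis).1.getD k [], pvInR n c := by
  intro fuel
  induction fuel with
  | zero => intro q groups dis h k hk; exact h k hk
  | succ fuel ih =>
    intro q groups dis h k hk
    simp only [pvBfs]
    by_cases hq : q = []
    · rw [if_pos hq]
      exact h k hk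
    · rw [if_neg hq]
      refine ih _ _ _ ?_ k hk
      intro k' hk' c' hc'
      rcases lt_trichotomy k' groups.length with hlt | heq | hgt
      · rw [List.getD_eq_getElem?_getD, List.getElem?_append_left hlt,
          ← List.getD_eq_getElem?_getD] at hc'
        exact h k' hk' c' hc'
      · rw [List.getD_eq_getElem?_getD, List.getElem?_append_right (le_of_eq heq.symm)] at hc'
        rw [heq] at hc'
        simp only [Nat.sub_self] at hc'
        have hc'' : c' ∈ (pvBfsStep n groups.length q dis).1 := by simpa using hc'
        exact pvBfsStep_inR c' hc''
      · rw [List.getD_eq_getElem?_getD, List.getElem?_eq_none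
          (by simp; omega), Option.getD_none] at hc'
        simp at hc'

theorem pvGetD_ofFn {α : Type} {N : Nat} (f : Fin N → α) (i : Nat) (d : α) (h : i < N) :
    (Array.ofFn f).getD i d = f ⟨i, h⟩ := by
  rw [Array.getD_eq_getD_getElem?]
  simp [h]

theorem pvInit_sim (N : Nat) :
    pvBnd N (Array.range N) ∧ pvMeas N (Array.range N) (fun _ => 0) ∧
    pvCBnd N (Array.range N, Array.ofFn (n := N) (fun k => [k.val])) ∧
    pvRel N (Array.range N) (Array.range N) := by
  have hget : ∀ x, x < N → (Array.range N).getD x x = x := fun x hx => pvGetD_range N x x hx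
  refine ⟨⟨Array.size_range, fun x hx => by rw [hget x hx]; exact hx⟩, ?_, ?_, ?_⟩
  · intro x hx hne
    rw [hget x hx] at hne
    exact absurd rfl hne
  · refine ⟨Array.size_range, by simp, fun x hx => by rw [hget x hx]; exact hx, ?_⟩
    intro l hl x
    rw [pvGetD_ofFn _ _ _ hl]
    simp only [List.mem_singleton]
    constructor
    · rintro rfl
      exact ⟨hl, hget x hl⟩
    · rintro ⟨hxN, hg⟩
      rw [hget x hxN] at hg
      exact hg
  · intro u v hu hv
    have hru : pvRt N (Array.range N) u = u := pvRootF_fix (hget u hu) N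
    have hrv : pvRt N (Array.range N) v = v := pvRootF_fix (hget v hv) N
    rw [hru, hrv, hget u hu, hget v hv]

-- ===== VERDICT (by name: the statement is the Claim_ definition above) =====
theorem maximumSafenessFactor2_spec : Claim_equal_maximumSafenessFactor2 := by
  intro grid _ _
  show maximumSafenessFactor2 grid = maximumSafenessFactor2_alt grid
  obtain ⟨hbnd, hmeas, hcbnd, hrel⟩ := pvInit_sim (grid.length * grid.length)
  refine pvLoop_sim rfl (pvPhase1 grid).1 (pvPhase1 grid).2 _ _ _ (fun _ => 0)
    hbnd hmeas hcbnd hrel ?_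
  intro d hd
  rw [PySem.List.mem_pyRange_neg_one] at hd
  have hlen3 : 3 ≤ (pvPhase1 grid).1.length := by
    have : (1 : Int) ≤ ((pvPhase1 grid).1.length : Int) - 2 := by omega
    omega
  have hn0 : 0 < grid.length := by
    by_contra hn
    have hg : grid = [] := by
      cases grid with
      | nil => rfl
      | cons a l => simp at hn
    subst hg
    have : (pvPhase1 ([] : List (List Int))).1.length = 1 := rfl
    omega
  refine ⟨hn0, ?_⟩
  intro c hc
  have hk : 1 ≤ d.toNat := by omega
  have hu : (pvPhase1 grid).1 = (pvBfs grid.length (grid.length * grid.length + 2)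
      (pvSources grid).1 [(pvSources grid).1] (pvSources grid).2).1 := rfl
  rw [hu] at hc
  refine pvBfs_groups_inR _ _ _ _ ?_ d.toNat hk c hc
  intro k hk1 c' hc'
  rw [List.getD_eq_getElem?_getD, List.getElem?_eq_none (by simp; omega), Option.getD_none] at hc'
  simp at hc'
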